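-- pv_equiv track=rewrite | github.com/PatB1234/CodeJam-problems | SavingUniverse.py | calcDamage
-- ===== SOURCE A (Python) =====
-- def calcDamage(arr):
--
--     damageTaken = 0
--     beam = 1
--     for j in range(len(arr)):
--
--         if (arr[j] == 'C'):
--
--             beam *= 2
--         elif (arr[j] == 'S'):
--
--             damageTaken += beam
--
--     return damageTaken
-- ===== SOURCE B (Python) =====
-- def calcDamage(arr):
--     f = 0
--     for ch in reversed(arr):
--         if ch == 'S':
--             f += 1
--         elif ch == 'C':
--             f *= 2
--     return f
-- ===== Notes on version B (the rewrite author's own statement) =====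
-- stated objective: alternative
-- what changed: Replaces the forward two-accumulator scan (running beam power plus damage sum) with a single-accumulator reverse pass where 'S' adds 1 and each 'C' to the left doubles the accumulated contribution.
import Mathlib
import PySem

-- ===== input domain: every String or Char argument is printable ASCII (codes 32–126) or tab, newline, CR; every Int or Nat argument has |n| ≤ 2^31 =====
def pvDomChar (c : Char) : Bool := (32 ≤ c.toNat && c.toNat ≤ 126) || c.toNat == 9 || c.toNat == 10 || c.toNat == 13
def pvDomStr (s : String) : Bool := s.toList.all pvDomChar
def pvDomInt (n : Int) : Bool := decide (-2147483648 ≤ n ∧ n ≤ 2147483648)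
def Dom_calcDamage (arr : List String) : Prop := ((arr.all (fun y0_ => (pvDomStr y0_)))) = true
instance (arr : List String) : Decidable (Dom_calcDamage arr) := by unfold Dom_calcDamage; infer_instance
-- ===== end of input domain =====

-- B changes the decomposition: a single-accumulator reverse pass instead of A's forward scan with a running beam power; same cost.

-- ===== PORT A =====
-- forward loop over indices with state (damageTaken, beam)
def calcDamage (arr : List String) : Int :=
  (PySem.List.pyRange 0 arr.length 1).foldl
    (fun (st : Int × Int) j =>
      match PySem.List.pyGet? arr j with
      | some s =>
        if s = "C" then (st.1, st.2 * 2)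
        else if s = "S" then (st.1 + st.2, st.2)
        else st
      | none => st)   -- unreachable: j ranges over valid indices
    (0, 1) |>.1

-- ===== PORT B =====
-- reverse pass with one accumulator f: 'S' adds 1, 'C' doubles
def calcDamage_alt (arr : List String) : Int :=
  arr.reverse.foldl
    (fun (f : Int) ch =>
      if ch = "S" then f + 1
      else if ch = "C" then f * 2
      else f)
    0

-- ===== PRECONDITION & SPEC =====
def Spec_calcDamage (arr : List String) (out : Int) : Prop := out = calcDamage_alt arr
instance (arr : List String) (out : Int) : Decidable (Spec_calcDamage arr out) := by unfold Spec_calcDamage; infer_instance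

-- ===== CLAIM (what is proved, stated in full; the proofs are below) =====
def Claim_equal_calcDamage : Prop := ∀ (arr : List String), Dom_calcDamage arr → Spec_calcDamage arr (calcDamage arr)

-- ===== LEMMAS AND PROOFS =====

-- B as a foldr (reverse-foldl = foldr)
lemma alt_eq_foldr (arr : List String) :
    calcDamage_alt arr
      = arr.foldr (fun ch f => if ch = "S" then f + 1 else if ch = "C" then f * 2 else f) 0 := by
  simp [calcDamage_alt, List.foldl_reverse]

-- A's body loop over the explicit list of elements (range over indices fetches each element)
def stepA (st : Int × Int) (s : String) : Int × Int :=
  if s = "C" then (st.1, st.2 * 2)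
  else if s = "S" then (st.1 + st.2, st.2)
  else st

lemma range_fold_eq_elem_fold (arr : List String) (st : Int × Int) :
    (PySem.List.pyRange 0 arr.length 1).foldl
      (fun (st : Int × Int) j =>
        match PySem.List.pyGet? arr j with
        | some s => stepA st s
        | none => st) st
    = arr.foldl stepA st := by
  have h1 : (PySem.List.pyRange 0 arr.length 1).foldl
      (fun (st : Int × Int) j =>
        match PySem.List.pyGet? arr j with
        | some s => stepA st s
        | none => st) st
    = (PySem.List.pyRange 0 arr.length 1).foldl
      (fun (st : Int × Int) j => stepA st (PySem.List.pyGetD arr j "")) st := by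
    apply PySem.List.foldl_congr_mem'
    intro j hj st
    have hb := (PySem.List.mem_pyRange_one).1 hj
    have : PySem.List.pyGet? arr j = some (PySem.List.pyGetD arr j "") := by
      have h0 := hb.1
      have h2 : j < (arr.length : Int) := hb.2
      simp only [PySem.List.pyGet?, PySem.List.pyGetD, PySem.List.pyIdx?]
      split
      · simp only [Option.bind_some]
        have hlt : j.toNat < arr.length := by omega
        rw [List.getElem?_eq_getElem hlt]
        simp
      · omega
    rw [this]
  rw [h1]
  exact PySem.List.foldl_pyRange_zero_pyGetD arr "" stepA st

-- invariant: forward fold from (d, b) = d + b * foldr-value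
lemma fwd_eq (arr : List String) (d b : Int) :
    (arr.foldl stepA (d, b)).1
      = d + b * arr.foldr (fun ch f => if ch = "S" then f + 1 else if ch = "C" then f * 2 else f) 0 := by
  induction arr generalizing d b with
  | nil => simp
  | cons x xs ih =>
    simp only [List.foldl_cons, List.foldr_cons, stepA]
    by_cases hC : x = "C"
    · simp [hC, ih]; ring
    · by_cases hS : x = "S"
      · simp [hS, ih]; ring
      · simp [hC, hS, ih]

-- ===== VERDICT (by name: the statement is the Claim_ definition above) =====
theorem calcDamage_spec : Claim_equal_calcDamage := by
  intro arr _
  show calcDamage arr = calcDamage_alt arr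
  rw [alt_eq_foldr]
  have := range_fold_eq_elem_fold arr (0, 1)
  simp only [calcDamage, stepA] at this ⊢
  rw [this, fwd_eq]
  ring
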